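-- pv_equiv track=rewrite | github.com/raeez/chiral-bar-cobar | compute/lib/cy_sod_k3e_engine.py | hochschild_homology_hkr
-- ===== SOURCE A (Python) =====
-- def hochschild_homology_hkr(hodge_dict: dict, dim: int) -> dict:
--     r"""Compute HH_k via HKR isomorphism.
--
--     HKR: HH_k(X) = bigoplus_{q-p=k} H^q(X, Omega^p_X)
--     (with appropriate sign convention: HH_k = bigoplus_{p} H^{p+k}(X, Omega^p)).
--
--     Actually, the standard HKR for a smooth variety X of dimension n is:
--     HH_k(X) = bigoplus_{p-q = k} H^q(Omega^p_X) for Hochschild COHOMOLOGY,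
--     or equivalently by Hodge symmetry considerations.
--
--     For Hochschild HOMOLOGY (the relevant one for phantoms and SODs):
--     HH_k(X) = bigoplus_{q-p = k} H^q(Omega^p_X)
--     with k in {-n, ..., n}.
--
--     Actually the simplest convention: HH_*(X) = bigoplus_{i} H^{n-i}(Omega^i_X) for
--     Hochschild homology, as a single graded vector space.  Better to just compute:
--     dim HH_k = sum_{p} h^{p, p+k}  for homology,
--     where p ranges over valid indices.
--
--     Let's use: HH_k(X) = bigoplus_p H^{p+k}(X, Omega^p_X),  k in Z.
--     Then dim HH_k = sum_p h^{p, p+k} where h^{p,q} = dim H^q(Omega^p_X).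
--
--     Cross-check for a point: HH_0 = h^{0,0} = 1.  Good.
--     For a curve of genus g: HH_0 = h^{0,0} + h^{1,1} = 1 + g,
--         HH_{-1} = h^{1,0} = g, HH_1 = h^{0,1} = g.
--     For an elliptic curve: HH_0 = 2, HH_{-1} = HH_1 = 1.  dim HH_* = 4.
--
--     Returns dict {k: dim HH_k}.
--     """
--     result = {}
--     for k in range(-dim, dim + 1):
--         total = 0
--         for p in range(dim + 1):
--             q = p + k
--             if 0 <= q <= dim:
--                 total += hodge_dict.get((p, q), 0)
--         if total > 0 or -dim <= k <= dim:
--             result[k] = total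
--     return result
-- ===== SOURCE B (Python) =====
-- def hochschild_homology_hkr(hodge_dict: dict, dim: int) -> dict:
--     """Single pass: bucket each Hodge number h^{p,q} into HH_{q-p}."""
--     buckets = [0] * (2 * dim + 1)
--     for (p, q), v in hodge_dict.items():
--         if 0 <= p <= dim and 0 <= q <= dim:
--             buckets[q - p + dim] += v
--     return {k: buckets[k + dim] for k in range(-dim, dim + 1)}
-- ===== Notes on version B (the rewrite author's own statement) =====
-- stated objective: faster
-- what changed: Replaces the O(dim^2) double loop (for each k in [-dim,dim], scan all p with a dict lookup) by one pass over hodge_dict that adds each value into bucket q-p, then reads the 2*dim+1 buckets off in order.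
import Mathlib
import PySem

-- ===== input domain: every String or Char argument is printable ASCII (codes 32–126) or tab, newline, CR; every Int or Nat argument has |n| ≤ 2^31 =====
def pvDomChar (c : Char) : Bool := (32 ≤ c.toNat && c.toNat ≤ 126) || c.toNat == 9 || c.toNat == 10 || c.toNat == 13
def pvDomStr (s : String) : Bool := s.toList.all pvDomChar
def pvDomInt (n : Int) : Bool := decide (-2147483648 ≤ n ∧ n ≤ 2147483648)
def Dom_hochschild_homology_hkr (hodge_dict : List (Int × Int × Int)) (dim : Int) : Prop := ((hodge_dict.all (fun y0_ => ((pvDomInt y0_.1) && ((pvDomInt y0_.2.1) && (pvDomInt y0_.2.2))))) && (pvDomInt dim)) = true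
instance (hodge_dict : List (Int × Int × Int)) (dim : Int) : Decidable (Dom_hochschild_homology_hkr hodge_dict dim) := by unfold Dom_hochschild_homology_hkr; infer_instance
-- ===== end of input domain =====

-- B replaces A's double loop over (k, p) by one bucketing pass over hodge_dict; objective: faster (asymptotic, O(dim^2) -> O(dim + n)).

-- ===== PORT A =====
-- hodge_dict.get((p, q), 0): first entry of the association list whose key is (p, q), else 0
def pvHodgeGet (hodge_dict : List (Int × Int × Int)) (p q : Int) : Int :=
  match hodge_dict.find? (fun e => e.1 == p && e.2.1 == q) with
  | some e => e.2.2
  | none => 0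

def hochschild_homology_hkr (hodge_dict : List (Int × Int × Int)) (dim : Int) : List (Int × Int) :=
  ((PySem.List.pyRange (-dim) (dim + 1) 1).foldl (fun result k =>
      let total := (PySem.List.pyRange 0 (dim + 1) 1).foldl (fun total p =>
        let q := p + k
        if 0 ≤ q ∧ q ≤ dim then total + pvHodgeGet hodge_dict p q else total) 0
      if total > 0 ∨ (-dim ≤ k ∧ k ≤ dim) then result.insert k total else result)
    (PySem.Dict.empty)).items

-- ===== PORT B =====
def hochschild_homology_hkr_alt (hodge_dict : List (Int × Int × Int)) (dim : Int) : List (Int × Int) :=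
  let buckets0 : List Int := List.replicate (2 * dim + 1).toNat 0
  let buckets := hodge_dict.foldl (fun b e =>
      if 0 ≤ e.1 ∧ e.1 ≤ dim ∧ 0 ≤ e.2.1 ∧ e.2.1 ≤ dim then
        b.set (e.2.1 - e.1 + dim).toNat (b.getD (e.2.1 - e.1 + dim).toNat 0 + e.2.2)
      else b) buckets0
  (PySem.List.pyRange (-dim) (dim + 1) 1).map (fun k => (k, buckets.getD (k + dim).toNat 0))

-- ===== PRECONDITION & SPEC =====
-- Pre_ excludes association lists with duplicate (p, q) keys: those do not encode any Python dict
-- (a Python dict cannot contain two entries with the same key), so no Python input is excluded.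
def Pre_hochschild_homology_hkr (hodge_dict : List (Int × Int × Int)) (dim : Int) : Prop :=
  (hodge_dict.map (fun e => (e.1, e.2.1))).Nodup

instance (hodge_dict : List (Int × Int × Int)) (dim : Int) : Decidable (Pre_hochschild_homology_hkr hodge_dict dim) := by
  unfold Pre_hochschild_homology_hkr; infer_instance

def pvWitness_hochschild_homology_hkr : (List (Int × Int × Int)) × Int := ([(0, 0, 1), (1, 1, 1), (0, 1, 2)], 1)

def Spec_hochschild_homology_hkr (hodge_dict : List (Int × Int × Int)) (dim : Int) (out : List (Int × Int)) : Prop := out = hochschild_homology_hkr_alt hodge_dict dim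
instance (hodge_dict : List (Int × Int × Int)) (dim : Int) (out : List (Int × Int)) : Decidable (Spec_hochschild_homology_hkr hodge_dict dim out) := by unfold Spec_hochschild_homology_hkr; infer_instance

-- ===== CLAIM (what is proved, stated in full; the proofs are below) =====
def Claim_equal_hochschild_homology_hkr : Prop := ∀ (hodge_dict : List (Int × Int × Int)) (dim : Int), Dom_hochschild_homology_hkr hodge_dict dim → Pre_hochschild_homology_hkr hodge_dict dim → Spec_hochschild_homology_hkr hodge_dict dim (hochschild_homology_hkr hodge_dict dim)

-- ===== LEMMAS AND PROOFS =====

-- the common value: total Hodge number landing in degree k, summed over the whole list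
def pvBucketSum (hodge_dict : List (Int × Int × Int)) (dim k : Int) : Int :=
  (hodge_dict.map (fun e => if 0 ≤ e.1 ∧ e.1 ≤ dim ∧ 0 ≤ e.2.1 ∧ e.2.1 ≤ dim ∧ e.2.1 - e.1 = k then e.2.2 else 0)).sum

lemma sum_ite_point (l : List Int) (hl : l.Nodup) (a C : Int) :
    (l.map (fun p => if p = a then C else 0)).sum = if a ∈ l then C else 0 := by
  induction l with
  | nil => simp
  | cons x t ih =>
    rcases List.nodup_cons.mp hl with ⟨hx, ht⟩
    by_cases hxa : x = a
    · subst hxa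
      simp [ih ht, hx]
    · simp [hxa, ih ht, Ne.symm hxa]

-- the inner p-loop of A computes pvBucketSum, given no duplicate keys
lemma inner_loop_eq (hodge_dict : List (Int × Int × Int)) (dim k : Int)
    (hnd : (hodge_dict.map (fun e => (e.1, e.2.1))).Nodup) :
    (PySem.List.pyRange 0 (dim + 1) 1).foldl (fun total p =>
        let q := p + k
        if 0 ≤ q ∧ q ≤ dim then total + pvHodgeGet hodge_dict p q else total) 0
      = pvBucketSum hodge_dict dim k := by
  induction hodge_dict with
  | nil =>
    rw [PySem.List.foldl_congr_mem (g := fun total _ => total + 0)]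
    · rw [PySem.List.foldl_add]
      simp [pvBucketSum]
    · intro acc x hx
      dsimp only
      simp [pvHodgeGet]
  | cons e t ih =>
    have hkey : (e.1, e.2.1) ∉ t.map (fun e => (e.1, e.2.1)) := (List.nodup_cons.mp hnd).1
    have hnt := (List.nodup_cons.mp hnd).2
    -- pointwise: get over (e :: t) = get over t plus the indicator of e's key
    have hget : ∀ p q : Int, pvHodgeGet (e :: t) p q
        = pvHodgeGet t p q + (if p = e.1 ∧ q = e.2.1 then e.2.2 else 0) := by
      intro p q
      by_cases h : e.1 = p ∧ e.2.1 = q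
      · have hpt : pvHodgeGet t p q = 0 := by
          unfold pvHodgeGet
          cases hf : t.find? (fun e' => e'.1 == p && e'.2.1 == q) with
          | none => rfl
          | some e' =>
            exfalso
            have hmem := List.mem_of_find?_eq_some hf
            have hpq := List.find?_some hf
            simp only [Bool.and_eq_true, beq_iff_eq] at hpq
            have heq : (e.1, e.2.1) = (e'.1, e'.2.1) := by rw [h.1, h.2, hpq.1, hpq.2]
            exact hkey (heq ▸ List.mem_map_of_mem hmem)
        have hb : (e.1 == p && e.2.1 == q) = true := by simp [h.1, h.2]
        have hA : pvHodgeGet (e :: t) p q = e.2.2 := by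
          unfold pvHodgeGet
          simp [List.find?, hb]
        rw [hA, hpt, if_pos ⟨h.1.symm, h.2.symm⟩]
        ring
      · have h' : ¬ (p = e.1 ∧ q = e.2.1) := fun hc => h ⟨hc.1.symm, hc.2.symm⟩
        have hb : (e.1 == p && e.2.1 == q) = false := by
          by_cases h1 : e.1 = p
          · have h2 : e.2.1 ≠ q := fun h2 => h ⟨h1, h2⟩
            simp [h1, h2]
          · simp [h1]
        have hA : pvHodgeGet (e :: t) p q = pvHodgeGet t p q := by
          unfold pvHodgeGet
          simp [List.find?, hb]
        rw [hA, if_neg h']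
        ring
    rw [PySem.List.foldl_congr_mem
        (g := fun total p => total + ((if 0 ≤ p + k ∧ p + k ≤ dim then pvHodgeGet t p (p + k) else 0)
              + (if p = e.1 ∧ (0 ≤ e.1 + k ∧ e.1 + k ≤ dim ∧ e.2.1 = e.1 + k) then e.2.2 else 0)))]
    · rw [PySem.List.foldl_add]
      have hsplit : ((PySem.List.pyRange 0 (dim + 1) 1).map
          (fun p => (if 0 ≤ p + k ∧ p + k ≤ dim then pvHodgeGet t p (p + k) else 0)
            + (if p = e.1 ∧ (0 ≤ e.1 + k ∧ e.1 + k ≤ dim ∧ e.2.1 = e.1 + k) then e.2.2 else 0))).sum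
          = ((PySem.List.pyRange 0 (dim + 1) 1).map
              (fun p => if 0 ≤ p + k ∧ p + k ≤ dim then pvHodgeGet t p (p + k) else 0)).sum
            + ((PySem.List.pyRange 0 (dim + 1) 1).map
              (fun p => if p = e.1 ∧ (0 ≤ e.1 + k ∧ e.1 + k ≤ dim ∧ e.2.1 = e.1 + k) then e.2.2 else 0)).sum := by
        rw [← List.sum_map_add]
      rw [hsplit]
      have h1 : ((PySem.List.pyRange 0 (dim + 1) 1).map
          (fun p => if 0 ≤ p + k ∧ p + k ≤ dim then pvHodgeGet t p (p + k) else 0)).sum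
          = pvBucketSum t dim k := by
        rw [← ih hnt]
        rw [PySem.List.foldl_congr_mem
            (g := fun total p => total + (if 0 ≤ p + k ∧ p + k ≤ dim then pvHodgeGet t p (p + k) else 0))]
        · rw [PySem.List.foldl_add]
          ring
        · intro acc x hx
          dsimp only
          split_ifs <;> simp
      have h2 : ((PySem.List.pyRange 0 (dim + 1) 1).map
          (fun p => if p = e.1 ∧ (0 ≤ e.1 + k ∧ e.1 + k ≤ dim ∧ e.2.1 = e.1 + k) then e.2.2 else 0)).sum
          = if 0 ≤ e.1 ∧ e.1 ≤ dim ∧ 0 ≤ e.2.1 ∧ e.2.1 ≤ dim ∧ e.2.1 - e.1 = k then e.2.2 else 0 := by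
        by_cases hc : 0 ≤ e.1 + k ∧ e.1 + k ≤ dim ∧ e.2.1 = e.1 + k
        · have hptw : ∀ p : Int, (if p = e.1 ∧ (0 ≤ e.1 + k ∧ e.1 + k ≤ dim ∧ e.2.1 = e.1 + k) then e.2.2 else 0)
              = (if p = e.1 then e.2.2 else 0) := by
            intro p; by_cases hp : p = e.1 <;> simp [hp, hc]
          simp only [hptw]
          rw [sum_ite_point _ (PySem.List.nodup_pyRange_one _ _)]
          simp only [PySem.List.mem_pyRange_one]
          obtain ⟨c1, c2, c3⟩ := hc
          split_ifs with g1 g2 g2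
          · rfl
          · exact absurd ⟨by omega, by omega, by omega, by omega, by omega⟩ g2
          · obtain ⟨a1, a2, a3, a4, a5⟩ := g2
            exact absurd (⟨by omega, by omega⟩ : 0 ≤ e.1 ∧ e.1 < dim + 1) g1
          · rfl
        · have hptw : ∀ p : Int, (if p = e.1 ∧ (0 ≤ e.1 + k ∧ e.1 + k ≤ dim ∧ e.2.1 = e.1 + k) then e.2.2 else 0) = 0 := by
            intro p; simp [hc]
          simp only [hptw]
          simp only [List.map_const', List.sum_replicate, smul_zero]
          split_ifs with g1
          · obtain ⟨a1, a2, a3, a4, a5⟩ := g1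
            exact absurd ⟨by omega, by omega, by omega⟩ hc
          · rfl
      rw [h1, h2]
      simp only [pvBucketSum, List.map_cons, List.sum_cons]
      ring
    · intro acc p hp
      dsimp only
      rw [hget p (p + k)]
      by_cases hin : 0 ≤ p + k ∧ p + k ≤ dim
      · have hiff : (p = e.1 ∧ (p + k) = e.2.1) ↔ (p = e.1 ∧ (0 ≤ e.1 + k ∧ e.1 + k ≤ dim ∧ e.2.1 = e.1 + k)) := by
          constructor
          · rintro ⟨h1, h2⟩; exact ⟨h1, by omega, by omega, by omega⟩
          · rintro ⟨h1, h2, h3, h4⟩; exact ⟨h1, by omega⟩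
        rw [if_pos hin, if_pos hin, if_congr hiff rfl rfl]
      · have hcond : ¬ (p = e.1 ∧ (0 ≤ e.1 + k ∧ e.1 + k ≤ dim ∧ e.2.1 = e.1 + k)) := by
          rintro ⟨h1, h2, h3, h4⟩; exact hin ⟨by omega, by omega⟩
        rw [if_neg hin, if_neg hin, if_neg hcond]
        ring

-- A's result is the list of (k, pvBucketSum k) for k in range(-dim, dim+1)
lemma portA_eq (hodge_dict : List (Int × Int × Int)) (dim : Int)
    (hnd : (hodge_dict.map (fun e => (e.1, e.2.1))).Nodup) :
    hochschild_homology_hkr hodge_dict dim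
      = (PySem.List.pyRange (-dim) (dim + 1) 1).map (fun k => (k, pvBucketSum hodge_dict dim k)) := by
  unfold hochschild_homology_hkr
  rw [PySem.List.foldl_congr_mem
      (g := fun (result : PySem.Dict Int Int) k => result.insert k (pvBucketSum hodge_dict dim k))]
  · rw [PySem.Dict.items_foldl_insert_fresh]
    · have hemp : PySem.Dict.empty.items = ([] : List (Int × Int)) := rfl
      rw [hemp, List.nil_append]
    · intro a _; exact PySem.Dict.contains_empty a
    · simpa using PySem.List.nodup_pyRange_one (-dim) (dim + 1)
  · intro acc x hx
    have hx' := PySem.List.mem_pyRange_one.mp hx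
    dsimp only
    rw [inner_loop_eq hodge_dict dim x hnd]
    rw [if_pos (Or.inr ⟨by omega, by omega⟩)]

lemma getD_set_int (b : List Int) (j : Nat) (x : Int) (i : Nat) (hj : j < b.length) :
    (b.set j x).getD i 0 = if i = j then x else b.getD i 0 := by
  simp only [List.getD_eq_getElem?_getD, List.getElem?_set]
  by_cases h : i = j
  · simp [h, hj]
  · rw [if_neg (fun hc => h hc.symm), if_neg h]

-- invariant of B's bucketing pass
lemma bucket_loop (hodge_dict : List (Int × Int × Int)) (dim : Int) :
    ∀ (b : List Int), b.length = (2 * dim + 1).toNat → ∀ (i : Nat),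
    (hodge_dict.foldl (fun b e =>
        if 0 ≤ e.1 ∧ e.1 ≤ dim ∧ 0 ≤ e.2.1 ∧ e.2.1 ≤ dim then
          b.set (e.2.1 - e.1 + dim).toNat (b.getD (e.2.1 - e.1 + dim).toNat 0 + e.2.2)
        else b) b).getD i 0
      = b.getD i 0 + (hodge_dict.map (fun e =>
          if (0 ≤ e.1 ∧ e.1 ≤ dim ∧ 0 ≤ e.2.1 ∧ e.2.1 ≤ dim) ∧ (e.2.1 - e.1 + dim).toNat = i
          then e.2.2 else 0)).sum := by
  induction hodge_dict with
  | nil => intro b hb i; simp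
  | cons e t ih =>
    intro b hb i
    simp only [List.foldl_cons, List.map_cons, List.sum_cons]
    by_cases hc : 0 ≤ e.1 ∧ e.1 ≤ dim ∧ 0 ≤ e.2.1 ∧ e.2.1 ≤ dim
    · have hjlt : (e.2.1 - e.1 + dim).toNat < b.length := by
        rw [hb]; omega
      rw [if_pos hc]
      rw [ih _ (by simp [hb])]
      rw [getD_set_int _ _ _ _ hjlt]
      by_cases hi : i = (e.2.1 - e.1 + dim).toNat
      · subst hi
        rw [if_pos rfl, if_pos ⟨hc, rfl⟩]
        ring
      · rw [if_neg hi, if_neg (by rintro ⟨-, h2⟩; exact hi h2.symm)]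
        ring
    · rw [if_neg hc, ih _ hb, if_neg (by rintro ⟨h1, -⟩; exact hc h1)]
      ring

lemma portB_eq (hodge_dict : List (Int × Int × Int)) (dim : Int) :
    hochschild_homology_hkr_alt hodge_dict dim
      = (PySem.List.pyRange (-dim) (dim + 1) 1).map (fun k => (k, pvBucketSum hodge_dict dim k)) := by
  unfold hochschild_homology_hkr_alt
  dsimp only
  apply List.map_congr_left
  intro k hk
  have hk' := PySem.List.mem_pyRange_one.mp hk
  rw [bucket_loop hodge_dict dim _ (by simp) ((k + dim).toNat)]
  have hlt : (k + dim).toNat < (2 * dim + 1).toNat := by omega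
  have hrep : (List.replicate (2 * dim + 1).toNat (0 : Int)).getD (k + dim).toNat 0 = 0 := by
    simp [List.getD_eq_getElem?_getD, hlt]
  rw [hrep]
  have hptw : ∀ e : Int × Int × Int,
      (if (0 ≤ e.1 ∧ e.1 ≤ dim ∧ 0 ≤ e.2.1 ∧ e.2.1 ≤ dim) ∧ (e.2.1 - e.1 + dim).toNat = (k + dim).toNat
        then e.2.2 else 0)
      = (if 0 ≤ e.1 ∧ e.1 ≤ dim ∧ 0 ≤ e.2.1 ∧ e.2.1 ≤ dim ∧ e.2.1 - e.1 = k then e.2.2 else 0) := by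
    intro e
    by_cases h1 : 0 ≤ e.1 ∧ e.1 ≤ dim ∧ 0 ≤ e.2.1 ∧ e.2.1 ≤ dim
    · have h2 : (e.2.1 - e.1 + dim).toNat = (k + dim).toNat ↔ e.2.1 - e.1 = k := by omega
      simp [h1, h2]
    · rw [if_neg (by rintro ⟨ha, -⟩; exact h1 ha), if_neg (by rintro ⟨a1, a2, a3, a4, -⟩; exact h1 ⟨a1, a2, a3, a4⟩)]
  simp only [hptw, pvBucketSum]
  simp

-- ===== VERDICT (by name: the statement is the Claim_ definition above) =====
theorem hochschild_homology_hkr_spec : Claim_equal_hochschild_homology_hkr := by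
  intro hodge_dict dim _ hpre
  unfold Spec_hochschild_homology_hkr
  rw [portA_eq hodge_dict dim hpre, portB_eq]
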